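-- pv_equiv track=rewrite | github.com/ssoxong/coding-test | programmers/PCCP_2.py | solution
-- ===== SOURCE A (Python) =====
-- def solution(diffs, times, limit):
--     answer = 0
--     start = 1
--     end = 100000
--     total_spend = 0
--
--     while(start<=end):
--         level = (start+end)//2
--
--         total_spend = 0
--         spend = 0
--         time_prev = 0
--
--         for i, d in enumerate(diffs):
--             if d <= level:
--                 spend = times[i]
--             else:
--                 spend =(times[i]+time_prev)*(d-level)+times[i]
--
--             time_prev = times[i]
--             total_spend+=spend
--
--         if total_spend<=limit:
--             end = level-1
--         else:
--             start = level+1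
--
--     return start
-- ===== SOURCE B (Python) =====
-- def _bisect_right(a, x):
--     lo = 0
--     hi = len(a)
--     while lo < hi:
--         mid = (lo + hi) // 2
--         if x < a[mid]:
--             hi = mid
--         else:
--             lo = mid + 1
--     return lo
--
-- def solution(diffs, times, limit):
--     # spend at level L is  times[i] + (times[i]+prev)*(d-L) for d > L, else times[i]:
--     # total(L) = base + sum over rows (d,w) with d > L of w*(d-L), w = times[i]+prev.
--     base = 0
--     rows = []
--     tp = 0
--     for i, d in enumerate(diffs):
--         t = times[i]
--         base += t
--         rows.append((d, t + tp))
--         tp = t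
--     rows.sort(key=lambda r: r[0])
--     ds = [r[0] for r in rows]
--     pref_w = [0]
--     pref_p = [0]
--     for d, w in rows:
--         pref_w.append(pref_w[-1] + w)
--         pref_p.append(pref_p[-1] + w * d)
--     tot_w = pref_w[-1]
--     tot_p = pref_p[-1]
--     start = 1
--     end = 100000
--     while start <= end:
--         level = (start + end) // 2
--         j = _bisect_right(ds, level)
--         total_spend = base + (tot_p - pref_p[j]) - (tot_w - pref_w[j]) * level
--         if total_spend <= limit:
--             end = level - 1
--         else:
--             start = level + 1
--     return start
-- ===== Notes on version B (the rewrite author's own statement) =====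
-- stated objective: alternative
-- what changed: A re-runs the whole per-item cost loop at each binary-search probe; B builds (d, w) rows once, sorts them by d with prefix sums, and answers each probe of the same binary search in O(log n) by bisecting for the level and evaluating the closed form base + (sumP - prefP[j]) - (sumW - prefW[j])*level.
import Mathlib
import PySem

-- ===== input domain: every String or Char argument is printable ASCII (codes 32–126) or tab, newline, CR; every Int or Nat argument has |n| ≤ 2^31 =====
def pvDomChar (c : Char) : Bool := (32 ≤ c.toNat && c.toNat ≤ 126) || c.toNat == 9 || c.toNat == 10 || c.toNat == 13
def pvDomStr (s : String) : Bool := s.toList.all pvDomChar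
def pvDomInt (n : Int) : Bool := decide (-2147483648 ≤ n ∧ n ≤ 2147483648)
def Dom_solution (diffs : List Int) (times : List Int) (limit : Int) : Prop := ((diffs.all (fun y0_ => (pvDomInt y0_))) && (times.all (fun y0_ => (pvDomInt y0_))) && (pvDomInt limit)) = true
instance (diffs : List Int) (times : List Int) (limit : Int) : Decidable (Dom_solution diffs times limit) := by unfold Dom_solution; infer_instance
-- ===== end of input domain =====

-- B keeps A's binary search over levels but replaces the O(n) per-probe rescan of all items by an
-- O(log n) probe: one pass builds (d, w) rows, they are sorted by d with prefix sums, and each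
-- probed level evaluates the exact closed form base + Σ_{d>level} w·(d−level) via bisect.

-- ===== PORT A =====
-- inner `for i, d in enumerate(diffs)` loop of A (state = (total_spend, time_prev))
def spendStep (times : List Int) (level : Int) (st : Int × Int) (p : Int × Int) : Int × Int :=
  let t := (PySem.List.pyGet? times p.1).getD 0
  (st.1 + (if p.2 ≤ level then t else (t + st.2) * (p.2 - level) + t), t)

def totalSpend (diffs times : List Int) (level : Int) : Int :=
  ((PySem.List.enumerate diffs 0).foldl (spendStep times level) (0, 0)).1

-- A's `while start <= end` binary-search loop
def loopA (diffs times : List Int) (limit start e : Int) : Int :=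
  if h : start ≤ e then
    let level := PySem.Int.floordiv (start + e) 2
    if totalSpend diffs times level ≤ limit then loopA diffs times limit start (level - 1)
    else loopA diffs times limit (level + 1) e
  else start
termination_by (e - start + 1).toNat
decreasing_by
  · have hb := PySem.Int.floordiv_two_mid_bounds h
    omega
  · have hb := PySem.Int.floordiv_two_mid_bounds h
    omega

def solution (diffs : List Int) (times : List Int) (limit : Int) : Int :=
  loopA diffs times limit 1 100000

-- ===== PORT B =====
-- Source B's hand-rolled `_bisect_right` while-loop
def bisectLoop (a : List Int) (x lo hi : Int) : Int :=
  if h : lo < hi then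
    let mid := PySem.Int.floordiv (lo + hi) 2
    if x < (PySem.List.pyGet? a mid).getD 0 then bisectLoop a x lo mid
    else bisectLoop a x (mid + 1) hi
  else lo
termination_by (hi - lo).toNat
decreasing_by
  · have hm : PySem.Int.floordiv (lo + hi) 2 = (lo + hi) / 2 :=
      PySem.Int.floordiv_eq_ediv_of_pos (by norm_num)
    omega
  · have hm : PySem.Int.floordiv (lo + hi) 2 = (lo + hi) / 2 :=
      PySem.Int.floordiv_eq_ediv_of_pos (by norm_num)
    omega

def bisectRight (a : List Int) (x : Int) : Int := bisectLoop a x 0 (a.length : Int)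

-- Source B's building loop `for i, d in enumerate(diffs)` (state = (base, rows, tp))
def buildRows (times : List Int) (st : Int × List (Int × Int) × Int) (p : Int × Int) :
    Int × List (Int × Int) × Int :=
  let t := (PySem.List.pyGet? times p.1).getD 0
  (st.1 + t, st.2.1 ++ [(p.2, t + st.2.2)], t)

-- Source B's prefix-sum loop `for d, w in rows` (state = (pref_w, pref_p); `pref[-1]` = last element)
def prefStep (st : List Int × List Int) (r : Int × Int) : List Int × List Int :=
  (st.1 ++ [(PySem.List.pyGet? st.1 (-1)).getD 0 + r.2],
   st.2 ++ [(PySem.List.pyGet? st.2 (-1)).getD 0 + r.2 * r.1])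

-- Source B's `while start <= end` binary search with the O(1) probe formula
def loopB (limit base totW totP : Int) (ds : List Int) (prefW prefP : List Int)
    (start e : Int) : Int :=
  if h : start ≤ e then
    let level := PySem.Int.floordiv (start + e) 2
    let j := bisectRight ds level
    let total := base + (totP - (PySem.List.pyGet? prefP j).getD 0)
      - (totW - (PySem.List.pyGet? prefW j).getD 0) * level
    if total ≤ limit then loopB limit base totW totP ds prefW prefP start (level - 1)
    else loopB limit base totW totP ds prefW prefP (level + 1) e
  else start
termination_by (e - start + 1).toNat
decreasing_by
  · have hb := PySem.Int.floordiv_two_mid_bounds h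
    omega
  · have hb := PySem.Int.floordiv_two_mid_bounds h
    omega

def solution_alt (diffs : List Int) (times : List Int) (limit : Int) : Int :=
  let b := (PySem.List.enumerate diffs 0).foldl (buildRows times) (0, [], 0)
  let rows := PySem.List.sorted b.2.1 (fun r => r.1) false
  let ds := rows.map (fun r => r.1)
  let pf := rows.foldl prefStep ([0], [0])
  let totW := (PySem.List.pyGet? pf.1 (-1)).getD 0
  let totP := (PySem.List.pyGet? pf.2 (-1)).getD 0
  loopB limit b.1 totW totP ds pf.1 pf.2 1 100000

-- ===== PRECONDITION & SPEC =====
-- Pre_ excludes exactly the inputs with more diffs than times, on which A raises IndexError.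
def Pre_solution (diffs : List Int) (times : List Int) (limit : Int) : Prop :=
  diffs.length ≤ times.length
instance (diffs : List Int) (times : List Int) (limit : Int) : Decidable (Pre_solution diffs times limit) := by unfold Pre_solution; infer_instance

def pvWitness_solution : List Int × List Int × Int := ([2, 5], [3, 4], 100)

def Spec_solution (diffs : List Int) (times : List Int) (limit : Int) (out : Int) : Prop := out = solution_alt diffs times limit
instance (diffs : List Int) (times : List Int) (limit : Int) (out : Int) : Decidable (Spec_solution diffs times limit out) := by unfold Spec_solution; infer_instance

-- ===== CLAIM (what is proved, stated in full; the proofs are below) =====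
def Claim_equal_solution : Prop := ∀ (diffs : List Int) (times : List Int) (limit : Int), Dom_solution diffs times limit → Pre_solution diffs times limit → Spec_solution diffs times limit (solution diffs times limit)

-- ===== LEMMAS AND PROOFS =====

-- ghost: the three precomputed structures of B, named for the proofs
def bFold (diffs times : List Int) : Int × List (Int × Int) × Int :=
  (PySem.List.enumerate diffs 0).foldl (buildRows times) (0, [], 0)

def rowsS (diffs times : List Int) : List (Int × Int) :=
  PySem.List.sorted (bFold diffs times).2.1 (fun r => r.1) false

def dsOf (diffs times : List Int) : List Int := (rowsS diffs times).map (fun r => r.1)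

def pfOf (diffs times : List Int) : List Int × List Int :=
  (rowsS diffs times).foldl prefStep ([0], [0])

-- ghost: contribution of one row (d, w) at a probed level, and their sum
def fval (l : Int) (r : Int × Int) : Int := if l < r.1 then r.2 * (r.1 - l) else 0

def rsum (l : Int) (rs : List (Int × Int)) : Int := (rs.map (fval l)).sum

theorem rsum_append (l : Int) (rs ss : List (Int × Int)) :
    rsum l (rs ++ ss) = rsum l rs + rsum l ss := by
  simp [rsum]

theorem closed_fold (times : List Int) (l : Int) :
    ∀ (xs : List (Int × Int)) (a b : Int) (rs : List (Int × Int)) (tp : Int),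
      (xs.foldl (spendStep times l) (a, tp)).1 + b + rsum l rs
        = a + ((xs.foldl (buildRows times) (b, rs, tp)).1
            + rsum l (xs.foldl (buildRows times) (b, rs, tp)).2.1) := by
  intro xs
  induction xs with
  | nil => intro a b rs tp; simp; ring
  | cons p xs ih =>
    intro a b rs tp
    simp only [List.foldl_cons, spendStep, buildRows]
    set t := (PySem.List.pyGet? times p.1).getD 0 with hT
    have hstep : (a + (if p.2 ≤ l then t else (t + tp) * (p.2 - l) + t))
        = a + t + fval l (p.2, t + tp) := by
      by_cases hc : p.2 ≤ l
      · have : ¬ l < p.2 := by omega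
        simp [hc, fval, this]
      · have : l < p.2 := by omega
        simp [hc, fval, this]
        ring
    rw [hstep]
    have := ih (a + t + fval l (p.2, t + tp)) (b + t) (rs ++ [(p.2, t + tp)]) t
    have hra := rsum_append l rs [(p.2, t + tp)]
    have hone : rsum l [(p.2, t + tp)] = fval l (p.2, t + tp) := by simp [rsum]
    linarith [this]

theorem prefFold_eq (rows : List (Int × Int)) :
    rows.foldl prefStep ([0], [0])
      = ((List.range (rows.length + 1)).map (fun j => (((rows.take j).map (fun r => r.2)).sum)),
         (List.range (rows.length + 1)).map (fun j => (((rows.take j).map (fun r => r.2 * r.1)).sum))) := by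
  induction rows using List.reverseRecOn with
  | nil => simp [List.range_succ]
  | append_singleton rows r ih =>
    rw [List.foldl_append, ih]
    have hlen : (rows ++ [r]).length = rows.length + 1 := by simp
    rw [hlen]
    have hsplit : ∀ (g : Int × Int → Int),
        (List.range (rows.length + 1 + 1)).map
            (fun j => (((rows ++ [r]).take j).map g).sum)
          = (List.range (rows.length + 1)).map (fun j => ((rows.take j).map g).sum)
            ++ [((rows ++ [r]).map g).sum] := by
      intro g
      rw [List.range_succ, List.map_append]
      congr 1
      · apply List.map_congr_left
        intro j hj
        have hj' : j ≤ rows.length := by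
          have := List.mem_range.mp hj; omega
        rw [List.take_append_of_le_length hj']
      · simp
    rw [hsplit, hsplit]
    unfold prefStep
    have hlast : ∀ (f : Nat → Int),
        (PySem.List.pyGet? ((List.range (rows.length + 1)).map f) (-1)).getD 0
          = f rows.length := by
      intro f
      rw [List.range_succ, List.map_append]
      simp [PySem.List.pyGet?_neg_one_append_singleton]
    rw [List.foldl_cons, List.foldl_nil, hlast, hlast]
    simp [List.take_length, List.map_append]

theorem bisectLoop_spec (a : List Int) (x : Int)
    (hmono : ∀ (p q : Nat) (hp : p < a.length) (hq : q < a.length), p ≤ q → a[p] ≤ a[q]) :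
    ∀ (k : Nat) (lo hi : Int), (hi - lo).toNat = k → 0 ≤ lo → lo ≤ hi → hi ≤ (a.length : Int) →
      (∀ (i : Nat) (h : i < a.length), (i : Int) < lo → a[i] ≤ x) →
      (∀ (i : Nat) (h : i < a.length), hi ≤ (i : Int) → x < a[i]) →
      lo ≤ bisectLoop a x lo hi ∧ bisectLoop a x lo hi ≤ hi ∧
      (∀ (i : Nat) (h : i < a.length),
        ((i : Int) < bisectLoop a x lo hi → a[i] ≤ x) ∧
        (bisectLoop a x lo hi ≤ (i : Int) → x < a[i])) := by
  intro k
  induction k using Nat.strong_induction_on with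
  | _ k ih =>
    intro lo hi hk h0 hlh hha hlow hhigh
    by_cases h : lo < hi
    · rw [bisectLoop]
      simp only [h, dif_pos]
      have hm : PySem.Int.floordiv (lo + hi) 2 = (lo + hi) / 2 :=
        PySem.Int.floordiv_eq_ediv_of_pos (by norm_num)
      set mid := PySem.Int.floordiv (lo + hi) 2 with hmid
      have hb1 : lo ≤ mid := by omega
      have hb2 : mid < hi := by omega
      have hmn : mid.toNat < a.length := by omega
      have hget0 : PySem.List.pyGet? a mid = some a[mid.toNat] :=
        PySem.List.pyGet?_eq_some_getElem a (by omega) (by omega)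
      rw [hget0]
      simp only [Option.getD_some]
      by_cases hc : x < a[mid.toNat]
      · simp only [hc, if_true]
        obtain ⟨H1, H2, H3⟩ := ih (mid - lo).toNat (by omega) lo mid rfl h0 (by omega)
          (by omega) hlow
          (fun i hi' hge => lt_of_lt_of_le hc (hmono mid.toNat i hmn hi' (by omega)))
        exact ⟨H1, by omega, H3⟩
      · simp only [hc, if_false]
        have hle : a[mid.toNat] ≤ x := by omega
        obtain ⟨H1, H2, H3⟩ := ih (hi - (mid + 1)).toNat (by omega) (mid + 1) hi rfl
          (by omega) (by omega) hha
          (fun i hi' hlt => le_trans (hmono i mid.toNat hi' hmn (by omega)) hle) hhigh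
        exact ⟨by omega, H2, H3⟩
    · rw [bisectLoop]
      simp only [h, dif_neg, not_false_iff]
      refine ⟨le_rfl, hlh, fun i hi' => ⟨fun hlt => hlow i hi' hlt, fun hge => ?_⟩⟩
      exact hhigh i hi' (by omega)

theorem sum_fval_all (l : Int) (rs : List (Int × Int)) (hall : ∀ r ∈ rs, l < r.1) :
    rsum l rs = ((rs.map (fun r => r.2 * r.1)).sum) - l * ((rs.map (fun r => r.2)).sum) := by
  induction rs with
  | nil => simp [rsum]
  | cons r rs ih =>
    simp only [rsum, List.map_cons, List.sum_cons] at *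
    have hf : fval l r = r.2 * r.1 - l * r.2 := by
      have hr : l < r.1 := hall r List.mem_cons_self
      simp only [fval, hr, if_true]
      ring
    rw [hf, ih (fun q hq => hall q (List.mem_cons_of_mem _ hq))]
    ring

-- the probe equality: Source B's bisect-and-prefix formula computes exactly A's inner-loop total
theorem probe_eq (diffs times : List Int) (level : Int) :
    totalSpend diffs times level
      = (bFold diffs times).1
        + (((PySem.List.pyGet? (pfOf diffs times).2 (-1)).getD 0
            - (PySem.List.pyGet? (pfOf diffs times).2 (bisectRight (dsOf diffs times) level)).getD 0))
        - (((PySem.List.pyGet? (pfOf diffs times).1 (-1)).getD 0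
            - (PySem.List.pyGet? (pfOf diffs times).1 (bisectRight (dsOf diffs times) level)).getD 0)) * level := by
  set rows := rowsS diffs times with hrowsdef
  set ds := dsOf diffs times with hdsdef
  have hdslen : ds.length = rows.length := by simp [hdsdef, dsOf, hrowsdef]
  have hdsget : ∀ (i : Nat) (h : i < rows.length), ds[i]'(by omega) = (rows[i]).1 := by
    intro i h
    simp [hdsdef, dsOf, hrowsdef]
  -- sortedness of ds
  have hpair : rows.Pairwise (fun a b => a.1 ≤ b.1) :=
    PySem.List.sorted_pairwise (bFold diffs times).2.1 (fun r => r.1)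
  have hmono : ∀ (p q : Nat) (hp : p < ds.length) (hq : q < ds.length), p ≤ q →
      ds[p] ≤ ds[q] := by
    intro p q hp hq hpq
    rw [hdsget p (by omega), hdsget q (by omega)]
    rcases Nat.eq_or_lt_of_le hpq with he | hlt
    · subst he; exact le_rfl
    · exact (List.pairwise_iff_getElem.mp hpair) p q (by omega) (by omega) hlt
  -- bisect result
  obtain ⟨hj0, hjlen, hjpt⟩ := bisectLoop_spec ds level hmono
    ((ds.length : Int) - 0).toNat 0 (ds.length : Int) rfl le_rfl (by positivity) le_rfl
    (fun i h hlt => absurd hlt (by omega))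
    (fun i h hge => absurd hge (by omega))
  rw [show bisectRight ds level = bisectLoop ds level 0 (ds.length : Int) from rfl]
  set j := bisectLoop ds level 0 (ds.length : Int) with hjdef
  set jn := j.toNat with hjndef
  have hjn : jn ≤ rows.length := by omega
  -- closed form of A's inner loop
  have hclosed : totalSpend diffs times level
      = (bFold diffs times).1 + rsum level (bFold diffs times).2.1 := by
    have := closed_fold times level (PySem.List.enumerate diffs 0) 0 0 [] 0
    simpa [totalSpend, bFold, rsum] using this
  -- sorting permutes the rows, sums unchanged
  have hrs : rsum level (bFold diffs times).2.1 = rsum level rows :=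
    (((PySem.List.sorted_perm (bFold diffs times).2.1 (fun r => r.1) false).map
      (fval level)).sum_eq).symm
  -- split at jn
  have hsplit : rsum level rows = rsum level (rows.take jn) + rsum level (rows.drop jn) := by
    rw [← rsum_append, List.take_append_drop]
  have htake0 : rsum level (rows.take jn) = 0 := by
    apply List.sum_eq_zero
    intro y hy
    obtain ⟨r, hr, hyr⟩ := List.mem_map.mp hy
    rw [List.mem_take_iff_getElem] at hr
    obtain ⟨i, hi, hei⟩ := hr
    have hile : i < rows.length := by omega
    have hle : ds[i]'(by omega) ≤ level :=
      (hjpt i (by omega)).1 (by omega)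
    rw [hdsget i hile] at hle
    rw [← hyr]
    simp [fval, hei ▸ (by omega : ¬ level < rows[i].1)]
  have hdropall : ∀ r ∈ rows.drop jn, level < r.1 := by
    intro r hr
    rw [List.mem_drop_iff_getElem] at hr
    obtain ⟨i, hi, hei⟩ := hr
    have hile : jn + i < rows.length := by omega
    have hgt : level < ds[jn + i]'(by omega) :=
      (hjpt (jn + i) (by omega)).2 (by omega)
    rw [hdsget (jn + i) hile] at hgt
    rw [← hei]
    exact hgt
  have hdrop := sum_fval_all level (rows.drop jn) hdropall
  -- prefix sums
  have hpf : pfOf diffs times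
      = ((List.range (rows.length + 1)).map (fun j => (((rows.take j).map (fun r => r.2)).sum)),
         (List.range (rows.length + 1)).map (fun j => (((rows.take j).map (fun r => r.2 * r.1)).sum))) :=
    prefFold_eq rows
  have hat : ∀ (g : Int × Int → Int),
      (PySem.List.pyGet? ((List.range (rows.length + 1)).map (fun j => ((rows.take j).map g).sum)) j).getD 0
        = ((rows.take jn).map g).sum := by
    intro g
    rw [PySem.List.pyGet?_eq_some_getElem _ hj0 (by simp; omega)]
    simp [hjndef]
  have hlast : ∀ (g : Int × Int → Int),
      (PySem.List.pyGet? ((List.range (rows.length + 1)).map (fun j => ((rows.take j).map g).sum)) (-1)).getD 0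
        = (rows.map g).sum := by
    intro g
    rw [List.range_succ, List.map_append]
    simp only [List.map_cons, List.map_nil, PySem.List.pyGet?_neg_one_append_singleton, Option.getD_some]
    rw [List.take_of_length_le (by simp)]
  have hsumW : (rows.map (fun r => r.2)).sum
      = ((rows.take jn).map (fun r => r.2)).sum + ((rows.drop jn).map (fun r => r.2)).sum := by
    conv_lhs => rw [← List.take_append_drop jn rows]
    simp
  have hsumP : (rows.map (fun r => r.2 * r.1)).sum
      = ((rows.take jn).map (fun r => r.2 * r.1)).sum + ((rows.drop jn).map (fun r => r.2 * r.1)).sum := by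
    conv_lhs => rw [← List.take_append_drop jn rows]
    simp
  rw [hclosed, hrs, hsplit, htake0, hdrop, hpf]
  rw [hat, hat, hlast, hlast, hsumW, hsumP]
  ring

theorem loops_eq (diffs times : List Int) (limit : Int) :
    ∀ (k : Nat) (start e : Int), (e - start + 1).toNat = k →
      loopA diffs times limit start e
        = loopB limit (bFold diffs times).1
            ((PySem.List.pyGet? (pfOf diffs times).1 (-1)).getD 0)
            ((PySem.List.pyGet? (pfOf diffs times).2 (-1)).getD 0)
            (dsOf diffs times) (pfOf diffs times).1 (pfOf diffs times).2 start e := by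
  intro k
  induction k using Nat.strong_induction_on with
  | _ k ih =>
    intro start e hk
    by_cases h : start ≤ e
    · rw [loopA, loopB]
      simp only [h, dif_pos]
      have hb := PySem.Int.floordiv_two_mid_bounds h
      set level := PySem.Int.floordiv (start + e) 2 with hL
      rw [← probe_eq diffs times level]
      by_cases hfe : totalSpend diffs times level ≤ limit
      · simp only [hfe, if_true]
        exact ih ((level - 1) - start + 1).toNat (by omega) start (level - 1) rfl
      · simp only [hfe, if_false]
        exact ih (e - (level + 1) + 1).toNat (by omega) (level + 1) e rfl
    · rw [loopA, loopB]
      simp [h]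

-- ===== VERDICT (by name: the statement is the Claim_ definition above) =====
theorem solution_spec : Claim_equal_solution := by
  intro diffs times limit _hdom _hpre
  unfold Spec_solution solution solution_alt
  exact loops_eq diffs times limit ((100000 - 1 + 1 : Int)).toNat 1 100000 rfl
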